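-- pv_equiv track=rewrite | github.com/viancpolymtl/qsmell-cirq | tools/qsmell/qsmell/smell/quantum_smell_implementation_hybrid_approach/src/find_smell_232_module.py | find_smell_232
-- ===== SOURCE A (Python) =====
-- def find_smell_232(title):
--     call_split_list = title.split(';')
--     call_split_list = list(filter(lambda x: (x.strip() != ""), call_split_list))
--     pure_call_name_list = list()
--     for call in call_split_list:
--         pure_call_name_list.append(call.split("(", 1)[0].strip())
--     if 'measure' in pure_call_name_list:
--         first_measure_index = pure_call_name_list.index('measure')
--         sublist = pure_call_name_list[first_measure_index+1:]
--         for sub_call in sublist: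
--             if sub_call != 'measure':
--                 return 1
--         return 0
--     else:
--         return 0
-- ===== SOURCE B (Python) =====
-- def find_smell_232(title):
--     seen_measure = False
--     for call in title.split(';'):
--         if call.strip() == "":
--             continue
--         name = call.split("(", 1)[0].strip()
--         if seen_measure and name != 'measure':
--             return 1
--         if name == 'measure':
--             seen_measure = True
--     return 0
-- ===== Notes on version B (the rewrite author's own statement) =====
-- stated objective: simpler
-- what changed: Single pass over the ';'-segments with a seen_measure flag replaces A's three phases (build full name list, .index('measure'), slice and rescan).
import Mathlib
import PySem

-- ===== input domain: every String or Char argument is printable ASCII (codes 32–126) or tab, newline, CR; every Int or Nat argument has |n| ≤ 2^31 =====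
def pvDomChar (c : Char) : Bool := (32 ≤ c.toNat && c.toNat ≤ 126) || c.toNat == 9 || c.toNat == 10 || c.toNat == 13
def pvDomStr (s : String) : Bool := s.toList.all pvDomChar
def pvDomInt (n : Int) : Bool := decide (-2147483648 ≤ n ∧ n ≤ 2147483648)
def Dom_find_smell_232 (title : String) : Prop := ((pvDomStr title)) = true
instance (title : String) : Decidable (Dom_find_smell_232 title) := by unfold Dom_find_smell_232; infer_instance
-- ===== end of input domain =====

-- B is a single pass over the ';'-segments with a seen_measure flag, replacing A's
-- build-name-list / .index / slice / rescan phases; same result, simpler.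

-- ===== PORT A =====
-- the inner 'for sub_call in sublist: if sub_call != 'measure': return 1 … return 0'
def find_smell_232_scan : List String → Int
  | [] => 0
  | s :: rest => if s ≠ "measure" then 1 else find_smell_232_scan rest

def find_smell_232 (title : String) : Int :=
  let call_split_list := (PySem.Str.split? title ";").getD []          -- sep ";" ≠ "", always some
  let call_split_list := call_split_list.filter (fun x => PySem.Str.strip x != "")
  let pure_call_name_list := call_split_list.foldl
    (fun acc call => acc ++ [PySem.Str.strip (((PySem.Str.splitMax? call "(" 1).getD []).headD "")]) []
    -- call.split("(",1)[0]: split result is always a nonempty list, so [0] = headD ""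
  if "measure" ∈ pure_call_name_list then
    match PySem.List.index? pure_call_name_list "measure" with
    | some first_measure_index =>
        find_smell_232_scan (PySem.List.slice pure_call_name_list (some ((first_measure_index : Int) + 1)) none)
    | none => 0   -- unreachable: membership was just checked
  else 0

-- ===== PORT B =====
def find_smell_232_alt_loop : List String → Bool → Int
  | [], _ => 0
  | call :: rest, seen =>
      if PySem.Str.strip call = "" then find_smell_232_alt_loop rest seen
      else
        let name := PySem.Str.strip (((PySem.Str.splitMax? call "(" 1).getD []).headD "")
        if seen && name != "measure" then 1
        else find_smell_232_alt_loop rest (seen || name == "measure")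

def find_smell_232_alt (title : String) : Int :=
  find_smell_232_alt_loop ((PySem.Str.split? title ";").getD []) false

-- ===== PRECONDITION & SPEC =====
def Spec_find_smell_232 (title : String) (out : Int) : Prop := out = find_smell_232_alt title
instance (title : String) (out : Int) : Decidable (Spec_find_smell_232 title out) := by unfold Spec_find_smell_232; infer_instance

-- ===== CLAIM (what is proved, stated in full; the proofs are below) =====
def Claim_equal_find_smell_232 : Prop := ∀ (title : String), Dom_find_smell_232 title → Spec_find_smell_232 title (find_smell_232 title)

-- ===== LEMMAS AND PROOFS =====

-- name extracted from a segment (proof-side abbreviation)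
def pvName (call : String) : String :=
  PySem.Str.strip (((PySem.Str.splitMax? call "(" 1).getD []).headD "")

-- flag-state machine over the cleaned name list
def pvScanF : List String → Bool → Int
  | [], _ => 0
  | n :: r, seen =>
      if seen && n != "measure" then 1 else pvScanF r (seen || n == "measure")

-- A's tail phases, as a function of the cleaned name list
def pvAMain (names : List String) : Int :=
  if "measure" ∈ names then
    match PySem.List.index? names "measure" with
    | some i => find_smell_232_scan (names.drop (i + 1))
    | none => 0
  else 0

theorem pvLoop_eq_scanF (l : List String) (seen : Bool) :
    find_smell_232_alt_loop l seen
      = pvScanF ((l.filter (fun x => PySem.Str.strip x != "")).map pvName) seen := by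
  induction l generalizing seen with
  | nil => rfl
  | cons c rest ih =>
    by_cases h : PySem.Str.strip c = ""
    · simp [find_smell_232_alt_loop, h, ih]
    · simp [find_smell_232_alt_loop, h, pvScanF, pvName, ih]

theorem pvScanF_true (names : List String) :
    pvScanF names true = find_smell_232_scan names := by
  induction names with
  | nil => rfl
  | cons n r ih =>
    by_cases h : n = "measure"
    · simp [pvScanF, find_smell_232_scan, h, ih]
    · simp [pvScanF, find_smell_232_scan, h]

theorem pvScanF_false (names : List String) :
    pvScanF names false = pvAMain names := by
  induction names with
  | nil => rfl
  | cons n r ih =>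
    by_cases h : n = "measure"
    · subst h
      have h0 : PySem.List.index? ("measure" :: r) "measure" = some 0 :=
        PySem.List.index?_cons_self _ _
      have hR : pvAMain ("measure" :: r) = find_smell_232_scan r := by
        unfold pvAMain; rw [h0]; simp
      rw [hR]; simp [pvScanF, pvScanF_true]
    · have hb : (n == "measure") = false := by simp [h]
      rw [pvScanF, hb]
      simp only [Bool.false_and, Bool.false_or, if_neg Bool.false_ne_true]
      rw [ih]
      unfold pvAMain
      by_cases hm : "measure" ∈ r
      · have hne : PySem.List.index? r "measure" ≠ none := by
          intro hn; rw [PySem.List.index?_eq_none_iff] at hn; exact hn hm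
        rcases Option.ne_none_iff_exists'.mp hne with ⟨i, hi⟩
        rw [PySem.List.index?_cons_of_ne r h, hi]
        simp [hm, List.drop_succ_cons]
      · have hn : PySem.List.index? r "measure" = none :=
          (PySem.List.index?_eq_none_iff r "measure").mpr hm
        rw [PySem.List.index?_cons_of_ne r h, hn]
        simp [hm]

theorem pvSlice_drop (names : List String) (i : Nat) :
    PySem.List.slice names (some ((i : Int) + 1)) none = names.drop (i + 1) := by
  have : ((i : Int) + 1) = ((i + 1 : Nat) : Int) := by push_cast; ring
  rw [this, PySem.List.slice_from_natCast]

theorem pvAMain_eq_sliceform (L : List String) :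
    (if "measure" ∈ L then
      match PySem.List.index? L "measure" with
      | some i => find_smell_232_scan (PySem.List.slice L (some ((i : Int) + 1)) none)
      | none => 0
    else 0) = pvAMain L := by
  unfold pvAMain
  by_cases hm : "measure" ∈ L
  · simp only [hm, if_true]
    cases h : PySem.List.index? L "measure" with
    | none => rfl
    | some i => simp only [pvSlice_drop]
  · simp [hm]

-- ===== VERDICT (by name: the statement is the Claim_ definition above) =====
theorem find_smell_232_spec : Claim_equal_find_smell_232 := by
  intro title _
  unfold Spec_find_smell_232 find_smell_232 find_smell_232_alt
  rw [pvLoop_eq_scanF, pvScanF_false]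
  simp only [PySem.List.foldl_append_singleton_eq_map, List.nil_append]
  exact pvAMain_eq_sliceform _
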